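-- pv_equiv track=rewrite | github.com/pypi-data/pypi-mirror-55 | packages/bbrc-validator/bbrc_validator-0.5.3-py3-none-any.whl/bbrc/validation/sanity/data.py | has_reconstructed_scans
-- ===== SOURCE A (Python) =====
-- def has_reconstructed_scans(scans):
--     ''' Given a set of scan IDs, returns a boolean if these refer to a
--     collection of reconstructed scans '''
--
--     seq = {}
--     for each in ['alfa1', 'coronal', 'axial']:
--         seq[each] = []
--         for v in scans:
--             if each in v['xnat:imagescandata/type'].lower():
--                 seq[each].append(v['ID'])
--     return len(seq['alfa1']) * len(seq['coronal']) * len(seq['axial']) == 1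
-- ===== SOURCE B (Python) =====
-- def has_reconstructed_scans(scans):
--     ''' Given a set of scan IDs, returns a boolean if these refer to a
--     collection of reconstructed scans '''
--     alfa1 = coronal = axial = 0
--     for v in scans:
--         t = v['xnat:imagescandata/type'].lower()
--         if 'alfa1' in t:
--             alfa1 += 1
--         if 'coronal' in t:
--             coronal += 1
--         if 'axial' in t:
--             axial += 1
--     return alfa1 == 1 and coronal == 1 and axial == 1
-- ===== Notes on version B (the rewrite author's own statement) =====
-- stated objective: simpler
-- what changed: One pass over the scans with three counters (lowercasing each type once) instead of three separate passes that build intermediate ID lists whose lengths are multiplied.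
import Mathlib
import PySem

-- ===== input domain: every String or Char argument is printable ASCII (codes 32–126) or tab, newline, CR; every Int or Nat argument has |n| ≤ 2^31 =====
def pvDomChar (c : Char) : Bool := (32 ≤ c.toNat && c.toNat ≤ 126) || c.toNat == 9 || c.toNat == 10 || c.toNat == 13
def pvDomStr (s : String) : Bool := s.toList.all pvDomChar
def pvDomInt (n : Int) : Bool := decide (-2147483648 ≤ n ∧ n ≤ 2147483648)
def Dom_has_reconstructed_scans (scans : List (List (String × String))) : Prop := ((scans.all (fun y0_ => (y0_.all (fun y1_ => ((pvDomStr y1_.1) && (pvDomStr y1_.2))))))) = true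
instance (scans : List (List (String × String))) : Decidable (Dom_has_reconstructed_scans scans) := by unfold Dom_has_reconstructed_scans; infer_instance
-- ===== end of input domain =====

-- B makes ONE pass with three counters instead of A's three passes building ID lists (objective: simpler).
-- Shared helpers: Python dict lookup (first match in the association list) and the match test.
def pvGet (v : List (String × String)) (k : String) : Option String :=
  (v.find? (fun p => p.1 == k)).map (·.2)

-- 'kw in v['xnat:imagescandata/type'].lower()' (missing key read as ""; Pre_ excludes that input)
def pvMatches (v : List (String × String)) (kw : String) : Bool :=
  PySem.Str.isIn kw (PySem.Str.lower ((pvGet v "xnat:imagescandata/type").getD ""))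

-- ===== PORT A =====
-- inner 'for v in scans: if each in …: seq[each].append(v['ID'])' (missing 'ID' read as ""; Pre_ excludes that input)
def aCollect (scans : List (List (String × String))) (each : String) : List String :=
  scans.foldl (fun acc v => if pvMatches v each then acc ++ [(pvGet v "ID").getD ""] else acc) []

def has_reconstructed_scans (scans : List (List (String × String))) : Bool :=
  (aCollect scans "alfa1").length * (aCollect scans "coronal").length * (aCollect scans "axial").length == 1

-- ===== PORT B =====
def has_reconstructed_scans_alt (scans : List (List (String × String))) : Bool :=
  let c := scans.foldl (fun (c : Nat × Nat × Nat) v =>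
    ((if pvMatches v "alfa1" then c.1 + 1 else c.1),
     (if pvMatches v "coronal" then c.2.1 + 1 else c.2.1),
     (if pvMatches v "axial" then c.2.2 + 1 else c.2.2))) (0, 0, 0)
  c.1 == 1 && c.2.1 == 1 && c.2.2 == 1

-- ===== PRECONDITION & SPEC =====
-- Pre_ excludes exactly the inputs on which A raises KeyError: a scan without the type key,
-- or a keyword-matching scan without the 'ID' key.
def Pre_has_reconstructed_scans (scans : List (List (String × String))) : Prop :=
  ∀ v ∈ scans, (pvGet v "xnat:imagescandata/type").isSome = true ∧
    ((pvMatches v "alfa1" || pvMatches v "coronal" || pvMatches v "axial") = true →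
      (pvGet v "ID").isSome = true)
instance (scans : List (List (String × String))) : Decidable (Pre_has_reconstructed_scans scans) := by
  unfold Pre_has_reconstructed_scans; infer_instance

def pvWitness_has_reconstructed_scans : (List (List (String × String))) :=
  [[("xnat:imagescandata/type", "T1 ALFA1"), ("ID", "1")],
   [("xnat:imagescandata/type", "coronal"), ("ID", "2")],
   [("xnat:imagescandata/type", "axial"), ("ID", "3")]]

def Spec_has_reconstructed_scans (scans : List (List (String × String))) (out : Bool) : Prop :=
  out = has_reconstructed_scans_alt scans
instance (scans : List (List (String × String))) (out : Bool) : Decidable (Spec_has_reconstructed_scans scans out) := by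
  unfold Spec_has_reconstructed_scans; infer_instance

-- ===== CLAIM (what is proved, stated in full; the proofs are below) =====
def Claim_equal_has_reconstructed_scans : Prop := ∀ (scans : List (List (String × String))), Dom_has_reconstructed_scans scans → Pre_has_reconstructed_scans scans → Spec_has_reconstructed_scans scans (has_reconstructed_scans scans)

-- ===== LEMMAS AND PROOFS =====

-- A's per-keyword list has as many elements as there are matching scans.
theorem aCollect_length (scans : List (List (String × String))) (each : String) :
    (aCollect scans each).length = scans.countP (fun v => pvMatches v each) := by
  unfold aCollect
  rw [PySem.List.foldl_append_if (p := fun v => pvMatches v each)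
      (f := fun v => (pvGet v "ID").getD "")]
  simp [List.length_map, List.countP_eq_length_filter]

-- B's single fold computes the three match counts (accumulator generalized).
theorem altFold (scans : List (List (String × String))) (a b c : Nat) :
    scans.foldl (fun (c : Nat × Nat × Nat) v =>
      ((if pvMatches v "alfa1" then c.1 + 1 else c.1),
       (if pvMatches v "coronal" then c.2.1 + 1 else c.2.1),
       (if pvMatches v "axial" then c.2.2 + 1 else c.2.2))) (a, b, c)
    = (a + scans.countP (fun v => pvMatches v "alfa1"),
       b + scans.countP (fun v => pvMatches v "coronal"),
       c + scans.countP (fun v => pvMatches v "axial")) := by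
  induction scans generalizing a b c with
  | nil => simp
  | cons v vs ih =>
    simp only [List.foldl_cons, List.countP_cons, ih]
    by_cases h1 : pvMatches v "alfa1" <;> by_cases h2 : pvMatches v "coronal" <;>
      by_cases h3 : pvMatches v "axial" <;> simp [h1, h2, h3] <;> omega

-- ===== VERDICT (by name: the statement is the Claim_ definition above) =====
theorem has_reconstructed_scans_spec : Claim_equal_has_reconstructed_scans := by
  intro scans _ _
  unfold Spec_has_reconstructed_scans has_reconstructed_scans has_reconstructed_scans_alt
  rw [altFold]
  simp only [aCollect_length, Nat.zero_add]
  rcases hb : (scans.countP (fun v => pvMatches v "alfa1") *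
      scans.countP (fun v => pvMatches v "coronal") *
      scans.countP (fun v => pvMatches v "axial") == 1) with _ | _
  · -- product ≠ 1: some factor ≠ 1
    have h : ¬ (scans.countP (fun v => pvMatches v "alfa1") = 1 ∧
        scans.countP (fun v => pvMatches v "coronal") = 1 ∧
        scans.countP (fun v => pvMatches v "axial") = 1) := by
      intro ⟨h1, h2, h3⟩
      rw [h1, h2, h3] at hb
      simp at hb
    simp only [beq_eq_false_iff_ne, ne_eq] at *
    rcases not_and_or.mp h with h1 | h
    · simp [h1]
    · rcases not_and_or.mp h with h2 | h3
      · simp [h2]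
      · simp [h3]
  · have h := (beq_iff_eq ..).mp hb
    rw [mul_eq_one] at h
    rw [mul_eq_one] at h
    obtain ⟨⟨h1, h2⟩, h3⟩ := h
    simp [h1, h2, h3]
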